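-- pv_equiv track=rewrite | github.com/x32u/grief-cogs | shutup/utils.py | ghetto_string
-- ===== SOURCE A (Python) =====
-- def ghetto_word(word: str):  # sourcery no-metrics
--     # sourcery skip: low-code-quality
--     word = word.lower()
--     uwu = word.rstrip(".?!,")
--     punctuations = word[len(uwu) :]
--     final_punctuation = punctuations[-1] if punctuations else ""
--     extra_punctuation = punctuations[:-1] if punctuations else ""
--     if uwu in {"you're", "youre"}:
--         uwu = "ur"
--     elif uwu == "monty":
--         uwu = "daddy"
--     elif uwu == "you":
--         uwu = "chu"
--     elif uwu == "lol":
--         uwu = "ctfu"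
--     elif uwu == "lmfao":
--         uwu = "ctfu"
--
--     elif uwu == "no":
--         uwu = "naur"
--
--     elif uwu == "yes":
--         uwu = "yas"
--     elif uwu == "wtf":
--         uwu = "da fuck"
--     uwu += extra_punctuation + final_punctuation
--
--     return uwu
--
-- def ghetto_string(string: str) -> str:
--     """Make text GHETTO."""
--     converted = ""
--     current_word = ""
--     for letter in string:
--         if letter.isprintable() and not letter.isspace():
--             current_word += letter
--         elif current_word:
--             converted += ghetto_word(current_word) + letter
--             current_word = ""
--         else:
--             converted += letter
--     if current_word:
--         converted += ghetto_word(current_word)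
--     return converted
-- ===== SOURCE B (Python) =====
-- # Substitution-scan: lowercase once, then one left-to-right scan replacing key
-- # occurrences found at word boundaries; punctuation/separators are copied as-is.
-- _TABLE = [
--     ("you're", "ur"), ("youre", "ur"), ("monty", "daddy"), ("you", "chu"),
--     ("lol", "ctfu"), ("lmfao", "ctfu"), ("no", "naur"), ("yes", "yas"),
--     ("wtf", "da fuck"),
-- ]
--
--
-- def _is_word(c: str) -> bool:
--     return c.isprintable() and not c.isspace()
--
--
-- def _tail_ok(s: str, j: int) -> bool:
--     # after a key: optional trailing punctuation, then end of word run
--     while j < len(s) and s[j] in ".?!,":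
--         j += 1
--     return j == len(s) or not _is_word(s[j])
--
--
-- def ghetto_string(string: str) -> str:
--     """Make text GHETTO."""
--     s = string.lower()
--     out = []
--     i = 0
--     prev_word = False
--     while i < len(s):
--         matched = None
--         if not prev_word:
--             for key, val in _TABLE:
--                 if s.startswith(key, i) and _tail_ok(s, i + len(key)):
--                     matched = (key, val)
--                     break
--         if matched is None:
--             out.append(s[i])
--             prev_word = _is_word(s[i])
--             i += 1
--         else:
--             key, val = matched
--             out.append(val)
--             prev_word = True  # keys end in word characters
--             i += len(key)
--     return "".join(out)
-- ===== Notes on version B (the rewrite author's own statement) =====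
-- stated objective: alternative
-- what changed: Replaces A's run-accumulate-then-transform-each-word loop (with per-word lowercasing, rstrip and an elif chain) by a single substitution scan: lowercase the whole string once, then scan left-to-right replacing key occurrences found at word boundaries in place; separators and punctuation are never grouped or re-attached, just copied.
import Mathlib
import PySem

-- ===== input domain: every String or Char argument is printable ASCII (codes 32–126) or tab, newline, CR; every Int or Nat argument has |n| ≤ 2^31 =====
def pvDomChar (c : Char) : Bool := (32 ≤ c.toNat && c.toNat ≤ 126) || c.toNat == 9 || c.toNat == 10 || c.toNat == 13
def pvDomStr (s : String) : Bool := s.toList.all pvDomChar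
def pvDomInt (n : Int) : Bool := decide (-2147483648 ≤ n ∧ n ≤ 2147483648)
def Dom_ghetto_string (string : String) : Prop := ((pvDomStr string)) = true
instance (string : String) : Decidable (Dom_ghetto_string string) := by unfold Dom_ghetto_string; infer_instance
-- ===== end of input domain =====

-- B is an in-place substitution scanner: lowercase the whole string once, then one
-- left-to-right scan replacing key occurrences found at word boundaries; no run
-- grouping, no per-word transform. Objective: alternative algorithm, same cost.

-- ===== PORT A =====

-- c.isprintable(): hand-ported; exact on the ASCII domain (codes 32–126 printable, tab/newline/CR not)
def pyIsPrintable (c : Char) : Bool := 32 ≤ c.toNat && c.toNat ≤ 126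

-- `letter.isprintable() and not letter.isspace()`
def wordChar (c : Char) : Bool := pyIsPrintable c && !(PySem.Chars.isspace c)

-- membership in ".?!," (shared by A's rstrip set and B's trailing-punctuation test)
def isPunct (c : Char) : Bool := c = '.' || c = '?' || c = '!' || c = ','

-- word.rstrip(".?!,"): hand-ported (PySem has no rstrip-with-chars); exact: drops trailing chars from the set
def rstripPunct (cs : List Char) : List Char :=
  (cs.reverse.dropWhile isPunct).reverse

def ghetto_word_A (w : List Char) : List Char :=
  let word := PySem.Chars.lower w
  let uwu := rstripPunct word
  let punctuations := PySem.List.slice word (some (uwu.length : Int)) none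
  -- punctuations[-1] under the nonempty guard; default never used
  let final_punctuation := if punctuations ≠ [] then [PySem.List.pyGetD punctuations (-1) ' '] else []
  let extra_punctuation := if punctuations ≠ [] then PySem.List.slice punctuations none (some (-1)) else []
  let uwu2 :=
    if uwu = "you're".toList ∨ uwu = "youre".toList then "ur".toList
    else if uwu = "monty".toList then "daddy".toList
    else if uwu = "you".toList then "chu".toList
    else if uwu = "lol".toList then "ctfu".toList
    else if uwu = "lmfao".toList then "ctfu".toList
    else if uwu = "no".toList then "naur".toList
    else if uwu = "yes".toList then "yas".toList
    else if uwu = "wtf".toList then "da fuck".toList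
    else uwu
  uwu2 ++ (extra_punctuation ++ final_punctuation)

-- A's loop state: (converted, current_word)
def stepA (st : List Char × List Char) (c : Char) : List Char × List Char :=
  if wordChar c then (st.1, st.2 ++ [c])
  else if st.2 ≠ [] then (st.1 ++ ghetto_word_A st.2 ++ [c], [])
  else (st.1 ++ [c], [])

def finA (st : List Char × List Char) : List Char :=
  st.1 ++ (if st.2 ≠ [] then ghetto_word_A st.2 else [])

def ghetto_string (string : String) : String :=
  String.ofList (finA (string.toList.foldl stepA ([], [])))

-- ===== PORT B =====

-- the _TABLE list of (key, replacement) pairs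
def tableB : List (List Char × List Char) :=
  [("you're".toList, "ur".toList), ("youre".toList, "ur".toList),
   ("monty".toList, "daddy".toList), ("you".toList, "chu".toList),
   ("lol".toList, "ctfu".toList), ("lmfao".toList, "ctfu".toList),
   ("no".toList, "naur".toList), ("yes".toList, "yas".toList),
   ("wtf".toList, "da fuck".toList)]

-- _tail_ok(s, j): skip trailing punctuation, then require end of string or a non-word char
-- (ported on the suffix s[j:])
def tailOK : List Char → Bool
  | [] => true
  | c :: v => if isPunct c then tailOK v else !wordChar c

-- the `for key, val in _TABLE: if s.startswith(key, i) and _tail_ok(...)` search,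
-- on the suffix u = s[i:]; returns (val, len(key)) of the first key that fires
def tryKeys : List (List Char × List Char) → List Char → Option (List Char × Nat)
  | [], _ => none
  | (k, v) :: rest, u =>
    if PySem.Chars.startswith u k && tailOK (u.drop k.length) then some (v, k.length)
    else tryKeys rest u

-- every key of the table is nonempty, so a hit advances the scan (termination)
lemma tryKeys_pos (u : List Char) (v : List Char) (n : Nat)
    (h : tryKeys tableB u = some (v, n)) : 0 < n := by
  simp only [tableB, tryKeys] at h
  split_ifs at h <;>
    first
      | exact Option.noConfusion h
      | (simp only [Option.some.injEq, Prod.mk.injEq] at h; obtain ⟨-, hn⟩ := h; rw [← hn]; decide)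

-- the while loop: carries the remaining suffix and prev_word
def scanB : List Char → Bool → List Char
  | [], _ => []
  | c :: rest, prevWord =>
    if prevWord then c :: scanB rest (wordChar c)
    else
      match h : tryKeys tableB (c :: rest) with
      | some (v, n) => v ++ scanB ((c :: rest).drop n) true
      | none => c :: scanB rest (wordChar c)
termination_by s _ => s.length
decreasing_by
  · simp only [List.length_cons]; omega
  · have := tryKeys_pos _ _ _ h
    simp only [List.length_drop, List.length_cons]
    omega
  · simp only [List.length_cons]; omega

def ghetto_string_alt (string : String) : String :=
  String.ofList (scanB (PySem.Chars.lower string.toList) false)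

-- ===== PRECONDITION & SPEC =====
def Spec_ghetto_string (string : String) (out : String) : Prop := out = ghetto_string_alt string
instance (string : String) (out : String) : Decidable (Spec_ghetto_string string out) := by unfold Spec_ghetto_string; infer_instance

-- ===== CLAIM (what is proved, stated in full; the proofs are below) =====
def Claim_equal_ghetto_string : Prop := ∀ (string : String), Dom_ghetto_string string → Spec_ghetto_string string (ghetto_string string)

-- ===== LEMMAS AND PROOFS =====

-- boundary: the rest of the string starts with a non-word character (or is empty)
def Bdry (r : List Char) : Prop := r = [] ∨ ∃ d ds, r = d :: ds ∧ wordChar d = false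

-- lowering a character preserves word-ness (upper-case letters stay word chars)
lemma low_word (c : Char) :
    wordChar (PySem.Chars.lowerChar c) = wordChar c := by
  simp only [PySem.Chars.lowerChar, PySem.Chars.isupper]
  split_ifs with hu
  · have hu' : 65 ≤ c.toNat ∧ c.toNat ≤ 90 := by simpa using hu
    have hofn : (Char.ofNat (c.toNat + 32)).toNat = c.toNat + 32 := by
      have hv : (c.toNat + 32).isValidChar := Or.inl (by omega)
      simp [Char.ofNat, hv]
    simp only [wordChar, pyIsPrintable, PySem.Chars.isspace, hofn]
    rw [Bool.eq_iff_iff]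
    simp only [Bool.and_eq_true, Bool.not_eq_true', Bool.or_eq_false_iff,
      decide_eq_true_eq, decide_eq_false_iff_not]
    simp only [Bool.and_eq_false_iff, decide_eq_false_iff_not]
    omega
  · rfl

-- lowering fixes non-word characters
lemma low_nonword (c : Char) (hw : wordChar c = false) :
    PySem.Chars.lowerChar c = c := by
  simp only [PySem.Chars.lowerChar, PySem.Chars.isupper]
  split_ifs with hu
  · exfalso
    have hu' : 65 ≤ c.toNat ∧ c.toNat ≤ 90 := by simpa using hu
    simp only [wordChar, pyIsPrintable, PySem.Chars.isspace, Bool.and_eq_false_iff,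
      Bool.not_eq_false', Bool.and_eq_true, Bool.or_eq_true,
      decide_eq_true_eq, decide_eq_false_iff_not] at hw
    omega
  · rfl

lemma punct_word (c : Char) (h : isPunct c = true) : wordChar c = true := by
  simp only [isPunct, Bool.or_eq_true, decide_eq_true_eq] at h
  rcases h with ((h | h) | h) | h <;> subst h <;> decide

lemma tailOK_iff (t r : List Char) (ht : ∀ c ∈ t, wordChar c = true) (hr : Bdry r) :
    tailOK (t ++ r) = t.all isPunct := by
  induction t with
  | nil =>
    simp only [List.nil_append, List.all_nil]
    rcases hr with rfl | ⟨d, ds, rfl, hd⟩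
    · rfl
    · have hpd : isPunct d = false := by
        cases hp : isPunct d
        · rfl
        · exact absurd (punct_word d hp) (by simp [hd])
      simp [tailOK, hpd, hd]
  | cons c t ih =>
    have hwc : wordChar c = true := ht c List.mem_cons_self
    by_cases hp : isPunct c = true
    · simp only [List.cons_append, tailOK, hp, if_true, List.all_cons, Bool.true_and]
      exact ih (fun x hx => ht x (List.mem_cons_of_mem _ hx))
    · simp only [Bool.not_eq_true] at hp
      simp [List.cons_append, tailOK, hp, hwc]

lemma dropWhile_append_all {p : Char → Bool} (a b : List Char) (ha : ∀ c ∈ a, p c = true) :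
    (a ++ b).dropWhile p = b.dropWhile p := by
  induction a with
  | nil => simp
  | cons c a ih =>
    simp only [List.cons_append, List.dropWhile_cons, ha c List.mem_cons_self, if_true]
    exact ih (fun x hx => ha x (List.mem_cons_of_mem _ hx))

lemma rstrip_append_punct (k t : List Char) (ht : ∀ c ∈ t, isPunct c = true) :
    rstripPunct (k ++ t) = rstripPunct k := by
  simp only [rstripPunct, List.reverse_append]
  rw [dropWhile_append_all t.reverse k.reverse (fun c hc => ht c (List.mem_reverse.mp hc))]

-- w splits as its rstrip plus an all-punctuation tail
lemma rstrip_decomp (w : List Char) :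
    w = rstripPunct w ++ w.drop (rstripPunct w).length ∧
      (∀ c ∈ w.drop (rstripPunct w).length, isPunct c = true) := by
  have h1 : w = rstripPunct w ++ (w.reverse.takeWhile isPunct).reverse := by
    simp only [rstripPunct]
    rw [← List.reverse_append, List.takeWhile_append_dropWhile, List.reverse_reverse]
  have h2 : w.drop (rstripPunct w).length = (w.reverse.takeWhile isPunct).reverse := by
    set a := rstripPunct w with ha
    conv_lhs => rw [h1]
    rw [List.drop_left]
  constructor
  · rw [h2]; exact h1
  · intro c hc
    rw [h2, List.mem_reverse] at hc
    exact List.mem_takeWhile_imp hc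

-- a prefix of word ++ r made of word chars is a prefix of word
lemma prefix_of_run (k word r : List Char) (hk : ∀ c ∈ k, wordChar c = true)
    (hr : Bdry r) (hpre : k <+: word ++ r) : k <+: word := by
  induction k generalizing word with
  | nil => exact List.nil_prefix
  | cons a k ih =>
    cases word with
    | nil =>
      exfalso
      rcases hr with rfl | ⟨d, ds, rfl, hd⟩
      · simp at hpre
      · simp only [List.nil_append, List.cons_prefix_cons] at hpre
        have ha := hk a List.mem_cons_self
        rw [hpre.1, hd] at ha
        exact Bool.noConfusion ha
    | cons b w =>
      simp only [List.cons_append, List.cons_prefix_cons] at hpre ⊢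
      exact ⟨hpre.1, ih w (fun x hx => hk x (List.mem_cons_of_mem _ hx)) hpre.2⟩

-- the per-key condition of B's scanner is exactly "the stripped word equals the key"
lemma keyCond (k word r : List Char) (hk0 : k ≠ []) (hk1 : ∀ c ∈ k, wordChar c = true)
    (hk2 : rstripPunct k = k) (hword : ∀ c ∈ word, wordChar c = true) (hr : Bdry r) :
    (PySem.Chars.startswith (word ++ r) k && tailOK ((word ++ r).drop k.length)) =
      decide (rstripPunct word = k) := by
  rw [Bool.eq_iff_iff]
  simp only [Bool.and_eq_true, decide_eq_true_eq, PySem.Chars.startswith_iff]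
  constructor
  · rintro ⟨hpre, htail⟩
    obtain ⟨rest, hrest⟩ := prefix_of_run k word r hk1 hr hpre
    have hrw : ∀ c ∈ rest, wordChar c = true := by
      intro c hc
      exact hword c (by rw [← hrest]; exact List.mem_append_right _ hc)
    rw [← hrest, List.append_assoc, List.drop_left] at htail
    rw [tailOK_iff rest r hrw hr] at htail
    rw [← hrest, rstrip_append_punct k rest (by simpa [List.all_eq_true] using htail), hk2]
  · intro h
    obtain ⟨hdec, hall⟩ := rstrip_decomp word
    rw [h] at hdec hall
    constructor
    · exact ⟨word.drop k.length ++ r, by rw [← List.append_assoc, ← hdec]⟩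
    · conv_lhs => rw [hdec]
      rw [List.append_assoc, List.drop_left]
      rw [tailOK_iff _ r (fun c hc => punct_word c (hall c hc)) hr]
      simpa [List.all_eq_true] using hall

-- first-match over the table, normalised to a chain on the stripped word
def keyChain (stem : List Char) : Option (List Char × Nat) :=
  if stem = "you're".toList then some ("ur".toList, 6)
  else if stem = "youre".toList then some ("ur".toList, 5)
  else if stem = "monty".toList then some ("daddy".toList, 5)
  else if stem = "you".toList then some ("chu".toList, 3)
  else if stem = "lol".toList then some ("ctfu".toList, 3)
  else if stem = "lmfao".toList then some ("ctfu".toList, 5)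
  else if stem = "no".toList then some ("naur".toList, 2)
  else if stem = "yes".toList then some ("yas".toList, 3)
  else if stem = "wtf".toList then some ("da fuck".toList, 3)
  else none

lemma allWord_of_all (k : List Char) (h : k.all wordChar = true) : ∀ c ∈ k, wordChar c = true := by
  simpa [List.all_eq_true] using h

lemma tryKeys_run (word r : List Char) (hword : ∀ c ∈ word, wordChar c = true) (hr : Bdry r) :
    tryKeys tableB (word ++ r) = keyChain (rstripPunct word) := by
  simp only [tableB, tryKeys, keyChain]
  rw [keyCond "you're".toList word r (by simp) (allWord_of_all _ rfl) rfl hword hr,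
      keyCond "youre".toList word r (by simp) (allWord_of_all _ rfl) rfl hword hr,
      keyCond "monty".toList word r (by simp) (allWord_of_all _ rfl) rfl hword hr,
      keyCond "you".toList word r (by simp) (allWord_of_all _ rfl) rfl hword hr,
      keyCond "lol".toList word r (by simp) (allWord_of_all _ rfl) rfl hword hr,
      keyCond "lmfao".toList word r (by simp) (allWord_of_all _ rfl) rfl hword hr,
      keyCond "no".toList word r (by simp) (allWord_of_all _ rfl) rfl hword hr,
      keyCond "yes".toList word r (by simp) (allWord_of_all _ rfl) rfl hword hr,
      keyCond "wtf".toList word r (by simp) (allWord_of_all _ rfl) rfl hword hr]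
  simp only [decide_eq_true_eq]
  split_ifs <;> rfl

lemma tryKeys_nonword (d : Char) (ds : List Char) (hd : wordChar d = false) :
    tryKeys tableB (d :: ds) = none := by
  have h := tryKeys_run [] (d :: ds) (by simp) (Or.inr ⟨d, ds, rfl, hd⟩)
  simp only [List.nil_append] at h
  rw [h]
  rfl

-- a run of word characters is emitted literally under prev_word = true
lemma scan_literals (t r : List Char) (ht : ∀ c ∈ t, wordChar c = true) :
    scanB (t ++ r) true = t ++ scanB r true := by
  induction t with
  | nil => simp
  | cons c t ih =>
    rw [List.cons_append, scanB]
    simp only [if_true, ht c List.mem_cons_self]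
    rw [ih (fun x hx => ht x (List.mem_cons_of_mem _ hx))]
    rfl

lemma scan_true_bdry (r : List Char) (hr : Bdry r) : scanB r true = scanB r false := by
  rcases hr with rfl | ⟨d, ds, rfl, hd⟩
  · rw [scanB, scanB]
  · rw [scanB, scanB]
    simp only [if_true, Bool.false_eq_true, if_false]
    split
    · next v n h => rw [tryKeys_nonword d ds hd] at h; exact (Option.some_ne_none _ h.symm).elim
    · rfl

-- A's elif chain as an association lookup with default (proof-side normal form)
def assocGet : List (List Char × List Char) → List Char → List Char
  | [], stem => stem
  | (k, v) :: rest, stem => if stem = k then v else assocGet rest stem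

lemma chain_eq (u : List Char) :
    (if u = "you're".toList ∨ u = "youre".toList then "ur".toList
     else if u = "monty".toList then "daddy".toList
     else if u = "you".toList then "chu".toList
     else if u = "lol".toList then "ctfu".toList
     else if u = "lmfao".toList then "ctfu".toList
     else if u = "no".toList then "naur".toList
     else if u = "yes".toList then "yas".toList
     else if u = "wtf".toList then "da fuck".toList
     else u) = assocGet tableB u := by
  simp only [tableB, assocGet]
  split_ifs <;> simp_all

lemma gw_eq (w : List Char) :
    ghetto_word_A w =
      assocGet tableB (rstripPunct (PySem.Chars.lower w)) ++
        (PySem.Chars.lower w).drop (rstripPunct (PySem.Chars.lower w)).length := by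
  simp only [ghetto_word_A]
  generalize PySem.Chars.lower w = word
  rw [PySem.List.slice_from_natCast, chain_eq]
  by_cases hp : word.drop (rstripPunct word).length = []
  · simp [hp]
  · simp only [hp, ne_eq, not_false_eq_true, if_true]
    congr 1
    rw [PySem.List.slice_to_neg_one, PySem.List.pyGetD_neg_one _ _ hp]
    exact List.dropLast_concat_getLast hp

-- the word-run lemma: B's scan consumes one whole lowered word run and produces ghetto_word
-- consuming the punctuation tail of a matched key literally
lemma scan_match (word mr k : List Char) (hr : Bdry mr) (hk : rstripPunct word = k) :
    scanB (List.drop k.length (word ++ mr)) true = word.drop k.length ++ scanB mr false := by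
  obtain ⟨hdec, hall⟩ := rstrip_decomp word
  rw [hk] at hdec hall
  have ht : ∀ c ∈ word.drop k.length, wordChar c = true := fun c hc => punct_word c (hall c hc)
  set d := word.drop k.length with hd
  conv_lhs => rw [hdec]
  rw [List.append_assoc, List.drop_left]
  rw [scan_literals d mr ht, scan_true_bdry mr hr]

lemma GW' (word mr : List Char) (hwordw : ∀ c ∈ word, wordChar c = true)
    (hne : word ≠ []) (hr : Bdry mr) :
    scanB (word ++ mr) false =
      assocGet tableB (rstripPunct word) ++ word.drop (rstripPunct word).length ++
        scanB mr false := by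
  obtain ⟨c, tw, hct⟩ := List.exists_cons_of_ne_nil hne
  have htk : tryKeys tableB (c :: (tw ++ mr)) = keyChain (rstripPunct word) := by
    rw [show c :: (tw ++ mr) = word ++ mr by rw [hct]; rfl]
    exact tryKeys_run word mr hwordw hr
  rw [show word ++ mr = c :: (tw ++ mr) by rw [hct]; rfl, scanB]
  simp only [Bool.false_eq_true, if_false]
  split
  · next v n h =>
    rw [htk] at h
    simp only [keyChain] at h
    split_ifs at h with h1 h2 h3 h4 h5 h6 h7 h8 h9
    · simp only [Option.some.injEq, Prod.mk.injEq] at h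
      obtain ⟨hv, hn⟩ := h
      subst hv
      subst hn
      rw [h1, show assocGet tableB "you're".toList = "ur".toList from rfl,
          show c :: (tw ++ mr) = word ++ mr by rw [hct]; rfl,
          show (6 : Nat) = ("you're".toList).length from rfl,
          scan_match word mr _ hr h1]
      rw [List.append_assoc]
    · simp only [Option.some.injEq, Prod.mk.injEq] at h
      obtain ⟨hv, hn⟩ := h
      subst hv
      subst hn
      rw [h2, show assocGet tableB "youre".toList = "ur".toList from rfl,
          show c :: (tw ++ mr) = word ++ mr by rw [hct]; rfl,
          show (5 : Nat) = ("youre".toList).length from rfl,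
          scan_match word mr _ hr h2]
      rw [List.append_assoc]
    · simp only [Option.some.injEq, Prod.mk.injEq] at h
      obtain ⟨hv, hn⟩ := h
      subst hv
      subst hn
      rw [h3, show assocGet tableB "monty".toList = "daddy".toList from rfl,
          show c :: (tw ++ mr) = word ++ mr by rw [hct]; rfl,
          show (5 : Nat) = ("monty".toList).length from rfl,
          scan_match word mr _ hr h3]
      rw [List.append_assoc]
    · simp only [Option.some.injEq, Prod.mk.injEq] at h
      obtain ⟨hv, hn⟩ := h
      subst hv
      subst hn
      rw [h4, show assocGet tableB "you".toList = "chu".toList from rfl,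
          show c :: (tw ++ mr) = word ++ mr by rw [hct]; rfl,
          show (3 : Nat) = ("you".toList).length from rfl,
          scan_match word mr _ hr h4]
      rw [List.append_assoc]
    · simp only [Option.some.injEq, Prod.mk.injEq] at h
      obtain ⟨hv, hn⟩ := h
      subst hv
      subst hn
      rw [h5, show assocGet tableB "lol".toList = "ctfu".toList from rfl,
          show c :: (tw ++ mr) = word ++ mr by rw [hct]; rfl,
          show (3 : Nat) = ("lol".toList).length from rfl,
          scan_match word mr _ hr h5]
      rw [List.append_assoc]
    · simp only [Option.some.injEq, Prod.mk.injEq] at h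
      obtain ⟨hv, hn⟩ := h
      subst hv
      subst hn
      rw [h6, show assocGet tableB "lmfao".toList = "ctfu".toList from rfl,
          show c :: (tw ++ mr) = word ++ mr by rw [hct]; rfl,
          show (5 : Nat) = ("lmfao".toList).length from rfl,
          scan_match word mr _ hr h6]
      rw [List.append_assoc]
    · simp only [Option.some.injEq, Prod.mk.injEq] at h
      obtain ⟨hv, hn⟩ := h
      subst hv
      subst hn
      rw [h7, show assocGet tableB "no".toList = "naur".toList from rfl,
          show c :: (tw ++ mr) = word ++ mr by rw [hct]; rfl,
          show (2 : Nat) = ("no".toList).length from rfl,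
          scan_match word mr _ hr h7]
      rw [List.append_assoc]
    · simp only [Option.some.injEq, Prod.mk.injEq] at h
      obtain ⟨hv, hn⟩ := h
      subst hv
      subst hn
      rw [h8, show assocGet tableB "yes".toList = "yas".toList from rfl,
          show c :: (tw ++ mr) = word ++ mr by rw [hct]; rfl,
          show (3 : Nat) = ("yes".toList).length from rfl,
          scan_match word mr _ hr h8]
      rw [List.append_assoc]
    · simp only [Option.some.injEq, Prod.mk.injEq] at h
      obtain ⟨hv, hn⟩ := h
      subst hv
      subst hn
      rw [h9, show assocGet tableB "wtf".toList = "da fuck".toList from rfl,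
          show c :: (tw ++ mr) = word ++ mr by rw [hct]; rfl,
          show (3 : Nat) = ("wtf".toList).length from rfl,
          scan_match word mr _ hr h9]
      rw [List.append_assoc]
  · next h =>
    rw [htk] at h
    have hassoc : assocGet tableB (rstripPunct word) = rstripPunct word := by
      simp only [keyChain] at h
      split_ifs at h with g1 g2 g3 g4 g5 g6 g7 g8 g9 <;>
        first
          | exact Option.noConfusion h
          | simp only [tableB, assocGet, if_neg g1, if_neg g2, if_neg g3, if_neg g4, if_neg g5,
              if_neg g6, if_neg g7, if_neg g8, if_neg g9]
    rw [hassoc]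
    have hcw : wordChar c = true := hwordw c (by rw [hct]; exact List.mem_cons_self)
    rw [hcw]
    have htw : ∀ x ∈ tw, wordChar x = true := fun x hx => hwordw x (by rw [hct]; exact List.mem_cons_of_mem _ hx)
    rw [scan_literals tw mr htw, scan_true_bdry mr hr]
    have hw2 := (rstrip_decomp word).1
    conv_rhs => rw [← hw2]
    rw [hct]
    simp

lemma GW (w mr : List Char) (hw0 : w ≠ []) (hw : ∀ c ∈ w, wordChar c = true) (hr : Bdry mr) :
    scanB (PySem.Chars.lower w ++ mr) false = ghetto_word_A w ++ scanB mr false := by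
  rw [gw_eq w]
  apply GW'
  · intro c hc
    obtain ⟨a, ha, rfl⟩ := List.mem_map.mp hc
    rw [low_word]; exact hw a ha
  · show w.map PySem.Chars.lowerChar ≠ []
    simpa using hw0
  · exact hr

-- ===== A-side structure lemmas =====

lemma foldl_stepA_add (cs : List Char) (conv cur : List Char) :
    cs.foldl stepA (conv, cur) =
      (conv ++ (cs.foldl stepA ([], cur)).1, (cs.foldl stepA ([], cur)).2) := by
  induction cs generalizing conv cur with
  | nil => simp
  | cons c cs ih =>
    simp only [List.foldl_cons, stepA]
    by_cases hw : wordChar c = true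
    · simp only [hw, if_true]
      exact ih conv (cur ++ [c])
    · simp only [hw, if_false, Bool.false_eq_true]
      by_cases hc : cur = []
      · simp only [hc, ne_eq, not_true_eq_false, if_false, List.nil_append]
        rw [ih (conv ++ [c]) [], ih [c] []]
        simp [List.append_assoc]
      · simp only [hc, ne_eq, not_false_eq_true, if_true, List.nil_append]
        rw [ih (conv ++ ghetto_word_A cur ++ [c]) [], ih (ghetto_word_A cur ++ [c]) []]
        simp [List.append_assoc]

lemma finA_add (cs : List Char) (conv cur : List Char) :
    finA (cs.foldl stepA (conv, cur)) = conv ++ finA (cs.foldl stepA ([], cur)) := by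
  rw [foldl_stepA_add]
  simp [finA, List.append_assoc]

-- head of dropWhile fails the predicate
lemma dropWhile_head_false {p : Char → Bool} : ∀ (l : List Char) (x : Char) (xs : List Char),
    l.dropWhile p = x :: xs → p x = false := by
  intro l
  induction l with
  | nil => intro x xs h; simp at h
  | cons a l ih =>
    intro x xs h
    by_cases ha : p a = true
    · rw [List.dropWhile_cons, ha] at h
      simp at h
      exact ih x xs h
    · have ha' : p a = false := by simpa using ha
      rw [List.dropWhile_cons, ha'] at h
      simp at h
      rw [← h.1]; exact ha'

-- inside a word run, A's loop produces ghetto_word of the whole run then continues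
lemma loopA_word_run : ∀ (cs cur : List Char), cur ≠ [] →
    finA (cs.foldl stepA ([], cur)) =
      ghetto_word_A (cur ++ cs.takeWhile wordChar) ++
        (match cs.dropWhile wordChar with
         | [] => []
         | d :: ds => d :: finA (ds.foldl stepA ([], []))) := by
  intro cs
  induction cs with
  | nil =>
    intro cur hc
    simp [finA, hc]
  | cons c cs ih =>
    intro cur hc
    by_cases hw : wordChar c = true
    · have h1 : (c :: cs).foldl stepA ([], cur) = cs.foldl stepA ([], cur ++ [c]) := by
        simp [stepA, hw]
      rw [h1, ih (cur ++ [c]) (by simp)]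
      simp [hw, List.append_assoc]
    · have hw' : wordChar c = false := by simpa using hw
      have h1 : (c :: cs).foldl stepA ([], cur) = cs.foldl stepA (ghetto_word_A cur ++ [c], []) := by
        simp [stepA, hw', hc]
      rw [h1, finA_add]
      simp [hw', List.append_assoc]

-- main equivalence, strong induction on length
lemma main_aux : ∀ (n : Nat) (cs : List Char), cs.length ≤ n →
    finA (cs.foldl stepA ([], [])) = scanB (PySem.Chars.lower cs) false := by
  intro n
  induction n with
  | zero =>
    intro cs h
    have hnil : cs = [] := List.eq_nil_of_length_eq_zero (Nat.le_zero.mp h)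
    subst hnil
    rw [show PySem.Chars.lower ([] : List Char) = [] from rfl, scanB]
    rfl
  | succ n ih =>
    intro cs h
    cases cs with
    | nil =>
      rw [show PySem.Chars.lower ([] : List Char) = [] from rfl, scanB]
      rfl
    | cons c cs =>
      simp only [List.length_cons, Nat.succ_le_succ_iff] at h
      by_cases hw : wordChar c = true
      · have h1 : (c :: cs).foldl stepA ([], []) = cs.foldl stepA ([], [c]) := by
          simp [stepA, hw]
        rw [h1, loopA_word_run cs [c] (by simp)]
        have hsplit : c :: cs = (c :: cs.takeWhile wordChar) ++ cs.dropWhile wordChar := by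
          simp [List.takeWhile_append_dropWhile]
        have hmap : PySem.Chars.lower (c :: cs) =
            PySem.Chars.lower (c :: cs.takeWhile wordChar) ++
              PySem.Chars.lower (cs.dropWhile wordChar) := by
          conv_lhs => rw [hsplit]
          exact List.map_append ..
        rw [hmap]
        have hbd : Bdry (PySem.Chars.lower (cs.dropWhile wordChar)) := by
          cases hdrop : cs.dropWhile wordChar with
          | nil => exact Or.inl rfl
          | cons d ds =>
            refine Or.inr ⟨PySem.Chars.lowerChar d, PySem.Chars.lower ds, rfl, ?_⟩
            rw [low_word]
            exact dropWhile_head_false cs d ds hdrop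
        have hwords : ∀ x ∈ c :: cs.takeWhile wordChar, wordChar x = true := by
          intro x hx
          rcases List.mem_cons.mp hx with rfl | hx'
          · exact hw
          · exact List.mem_takeWhile_imp hx'
        rw [GW (c :: cs.takeWhile wordChar) _ (by simp) hwords hbd]
        congr 1
        cases hdrop : cs.dropWhile wordChar with
        | nil =>
          rw [show PySem.Chars.lower ([] : List Char) = [] from rfl, scanB]
        | cons d ds =>
          have hd : wordChar d = false := dropWhile_head_false cs d ds hdrop
          have hlen : ds.length ≤ n := by
            have h2 := List.length_dropWhile_le wordChar cs
            rw [hdrop] at h2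
            simp only [List.length_cons] at h2
            omega
          rw [show PySem.Chars.lower (d :: ds) =
                PySem.Chars.lowerChar d :: PySem.Chars.lower ds from rfl,
              low_nonword d hd, scanB]
          simp only [Bool.false_eq_true, if_false]
          split
          · next v m h2 =>
            rw [tryKeys_nonword d _ hd] at h2
            exact (Option.some_ne_none _ h2.symm).elim
          · rw [hd, ih ds hlen]
      · have hw' : wordChar c = false := by simpa using hw
        have h1 : (c :: cs).foldl stepA ([], []) = cs.foldl stepA ([c], []) := by
          simp [stepA, hw']
        rw [h1, finA_add, ih cs h]
        rw [show PySem.Chars.lower (c :: cs) =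
              PySem.Chars.lowerChar c :: PySem.Chars.lower cs from rfl,
            low_nonword c hw', scanB]
        simp only [Bool.false_eq_true, if_false]
        split
        · next v m h2 =>
          rw [tryKeys_nonword c _ hw'] at h2
          exact (Option.some_ne_none _ h2.symm).elim
        · rw [hw']
          rfl

-- ===== VERDICT (by name: the statement is the Claim_ definition above) =====
theorem ghetto_string_spec : Claim_equal_ghetto_string := by
  intro string hdom
  unfold Spec_ghetto_string ghetto_string ghetto_string_alt
  congr 1
  exact main_aux string.toList.length string.toList le_rfl
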